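-- pv_equiv track=rewrite | github.com/raovinnakota/BioInformatics | Lab_Reports/Lab05/rao_vinnakota_lab05.py | add_variable_copy
-- ===== SOURCE A (Python) =====
-- def add_variable_copy(seq1):
--     #max length of variable copy substring
--     max_int = int(len(seq1) / 2)
--     seq5 = seq1
--
--     #try substrings of different length, start at 3
--     for i in range(3, max_int + 1):
--         #iterate through the sequence
--         for j in range(len(seq1)):
--             #check consecutive substrings
--             one = seq1[j:j+i]
--             two = seq1[j+i:j+(2*i)]
--             #if the two are equal, create the new string
--             if (one == two):
--                 #new string with variable copy added
--                 seq5 = seq1[:j+(2*i)] + one + seq1[j+(2*i):]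
--     return (seq5)
-- ===== SOURCE B (Python) =====
-- def add_variable_copy(seq1):
--     # Scan repeat lengths from largest to smallest and positions right-to-left,
--     # using a one-pass common-extension recurrence per length, returning at the
--     # first (i.e. lexicographically last) tandem match.
--     n = len(seq1)
--     for i in range(n // 2, 2, -1):
--         ext = 0
--         for j in range(n - i - 1, -1, -1):
--             ext = ext + 1 if seq1[j] == seq1[j + i] else 0
--             if j + 2 * i <= n and ext >= i:
--                 return seq1[:j + 2 * i] + seq1[j:j + i] + seq1[j + 2 * i:]
--     return seq1
-- ===== Notes on version B (the rewrite author's own statement) =====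
-- stated objective: faster
-- what changed: B replaces A's exhaustive low-to-high scan with O(i)-cost slice comparisons at every (i,j) by a high-to-low search that maintains a common-extension length recurrence (ext[j] = ext[j+1]+1 or 0) per repeat length, deciding each tandem match in O(1) and returning at the first (= A's last) match.
import Mathlib
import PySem

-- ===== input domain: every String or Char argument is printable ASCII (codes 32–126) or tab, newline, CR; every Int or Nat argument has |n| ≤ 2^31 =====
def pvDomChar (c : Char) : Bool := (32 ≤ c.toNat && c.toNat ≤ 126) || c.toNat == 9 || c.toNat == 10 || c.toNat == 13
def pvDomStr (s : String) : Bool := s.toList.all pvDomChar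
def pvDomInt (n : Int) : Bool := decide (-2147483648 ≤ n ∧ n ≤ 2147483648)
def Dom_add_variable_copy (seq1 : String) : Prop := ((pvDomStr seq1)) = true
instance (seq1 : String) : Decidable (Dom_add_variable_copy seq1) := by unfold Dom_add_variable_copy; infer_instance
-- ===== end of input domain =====

-- B replaces A's low-to-high exhaustive scan (O(i)-cost slice comparison at every (i,j))
-- by a high-to-low search with an O(1) common-extension recurrence per length; objective: faster.

-- ===== PORT A =====
def add_variable_copy (seq1 : String) : String :=
  let s := seq1.toList
  let maxInt : Nat := s.length / 2          -- int(len(seq1) / 2), len ≥ 0 so = ⌊len/2⌋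
  let seq5 := (List.range' 3 (maxInt + 1 - 3)).foldl (fun (seq5 : List Char) (i : Nat) =>
    (List.range s.length).foldl (fun (seq5 : List Char) (j : Nat) =>
      let one := PySem.List.slice s (some (j : Int)) (some ((j : Int) + (i : Int)))
      let two := PySem.List.slice s (some ((j : Int) + (i : Int))) (some ((j : Int) + 2 * (i : Int)))
      if one = two then
        PySem.List.slice s none (some ((j : Int) + 2 * (i : Int))) ++ one ++
          PySem.List.slice s (some ((j : Int) + 2 * (i : Int))) none
      else seq5) seq5) s
  String.ofList seq5

-- ===== PORT B =====
-- inner loop of Source B: j from jp-1 down to 0, carrying the common-extension length ext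
def altGoJ (s : List Char) (n i : Nat) : Nat → Nat → Option (List Char)
  | 0, _ => none
  | j + 1, ext =>
    let ext' := if s.getD j ' ' = s.getD (j + i) ' ' then ext + 1 else 0
    if j + 2 * i ≤ n ∧ i ≤ ext' then
      some (s.take (j + 2 * i) ++ (s.drop j).take i ++ s.drop (j + 2 * i))
    else altGoJ s n i j ext'

-- outer loop of Source B: i from n//2 down to 3
def altGoI (s : List Char) (n : Nat) : Nat → Option (List Char)
  | 0 => none
  | 1 => none
  | 2 => none
  | i + 3 =>
    match altGoJ s n (i + 3) (n - (i + 3)) 0 with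
    | some r => some r
    | none => altGoI s n (i + 2)

def add_variable_copy_alt (seq1 : String) : String :=
  let s := seq1.toList
  match altGoI s s.length (s.length / 2) with
  | some r => String.ofList r
  | none => seq1

-- ===== PRECONDITION & SPEC =====
def Spec_add_variable_copy (seq1 : String) (out : String) : Prop := out = add_variable_copy_alt seq1
instance (seq1 : String) (out : String) : Decidable (Spec_add_variable_copy seq1 out) := by unfold Spec_add_variable_copy; infer_instance

-- ===== CLAIM (what is proved, stated in full; the proofs are below) =====
def Claim_equal_add_variable_copy : Prop := ∀ (seq1 : String), Dom_add_variable_copy seq1 → Spec_add_variable_copy seq1 (add_variable_copy seq1)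

-- ===== LEMMAS AND PROOFS =====

-- tandem-repeat match at (i, j), as both programs decide it
def matchB (s : List Char) (i j : Nat) : Bool :=
  decide (j + 2 * i ≤ s.length) && decide ((s.drop j).take i = (s.drop (j + i)).take i)

-- the inserted-copy result at (i, j)
def ins (s : List Char) (i j : Nat) : List Char :=
  s.take (j + 2 * i) ++ (s.drop j).take i ++ s.drop (j + 2 * i)

-- largest j < jp with a match
def innerSpec (s : List Char) (i : Nat) : Nat → Option Nat
  | 0 => none
  | j + 1 => if matchB s i j then some j else innerSpec s i j

-- largest i ≤ L (i ≥ 3) with a match, largest j for it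
def searchI (s : List Char) : Nat → Option (List Char)
  | 0 => none
  | 1 => none
  | 2 => none
  | i + 3 =>
    match innerSpec s (i + 3) s.length with
    | some j => some (ins s (i + 3) j)
    | none => searchI s (i + 2)

-- common-extension length at shift i from position j
def E (s : List Char) (i : Nat) (j : Nat) : Nat :=
  if h : j + i < s.length then
    (if s.getD j ' ' = s.getD (j + i) ' ' then E s i (j + 1) + 1 else 0)
  else 0
termination_by s.length - (j + i)
decreasing_by omega

theorem foldl_const_last {α β : Type} (g : α → β) :
    ∀ (l : List α) (init : β), l.foldl (fun _ x => g x) init = (l.getLast?).elim init g := by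
  intro l
  induction l with
  | nil => intro init; rfl
  | cons x t ih =>
    intro init
    cases t with
    | nil => simp
    | cons a b =>
      simp only [List.foldl_cons, ih]
      obtain ⟨y, hy⟩ := Option.isSome_iff_exists.mp (show (a :: b).getLast?.isSome by simp)
      rw [List.getLast?_cons_cons, hy]
      simp

theorem foldl_nested {α γ β : Type} (I : List α) (J : List γ) (h : β → α → γ → β) (init : β) :
    I.foldl (fun st i => J.foldl (fun st j => h st i j) st) init
      = (I.flatMap (fun i => J.map (fun j => (i, j)))).foldl (fun st p => h st p.1 p.2) init := by
  induction I generalizing init with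
  | nil => rfl
  | cons x t ih => simp only [List.foldl_cons, List.flatMap_cons, List.foldl_append, List.foldl_map, ih]

theorem dropTake_eq_imp (s : List Char) (i j : Nat) (hi : 1 ≤ i) (hj : j < s.length)
    (h : (s.drop j).take i = (s.drop (j + i)).take i) : j + 2 * i ≤ s.length := by
  have := congrArg List.length h
  simp only [List.length_take, List.length_drop] at this
  omega

theorem slices_eq_iff (s : List Char) (i j : Nat) (h2 : j + 2 * i ≤ s.length) :
    ((s.drop j).take i = (s.drop (j + i)).take i) ↔ ∀ t < i, s.getD (j + t) ' ' = s.getD (j + i + t) ' ' := by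
  constructor
  · intro h t ht
    have h1 : j + t < s.length := by omega
    have h2 : j + i + t < s.length := by omega
    have hg : ((s.drop j).take i)[t]'(by simp [List.length_take, List.length_drop]; omega)
        = ((s.drop (j + i)).take i)[t]'(by simp [List.length_take, List.length_drop]; omega) := by
      simp only [h]
    simp only [List.getElem_take, List.getElem_drop] at hg
    rw [List.getD_eq_getElem s ' ' h1, List.getD_eq_getElem s ' ' h2]
    convert hg using 2
  · intro h
    apply List.ext_getElem
    · simp [List.length_take, List.length_drop]; omega
    · intro t h1 h2
      simp only [List.getElem_take, List.getElem_drop]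
      have ht : t < i := by simp [List.length_take, List.length_drop] at h1; omega
      have := h t ht
      rw [List.getD_eq_getElem s ' ' (by omega), List.getD_eq_getElem s ' ' (by omega)] at this
      convert this using 2

theorem E_le (s : List Char) (i j : Nat) : E s i j ≤ s.length - (j + i) := by
  rw [E]
  split
  · split
    · have := E_le s i (j + 1)
      omega
    · omega
  · omega
termination_by s.length - (j + i)
decreasing_by omega

theorem E_ge_iff (s : List Char) (i : Nat) :
    ∀ (m j : Nat), j + i ≤ s.length →
      (m ≤ E s i j ↔ j + i + m ≤ s.length ∧ ∀ t < m, s.getD (j + t) ' ' = s.getD (j + i + t) ' ') := by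
  intro m
  induction m with
  | zero => intro j hj; simp [hj]
  | succ m ih =>
    intro j hj
    constructor
    · intro hE
      have hlt : j + i < s.length := by
        by_contra hc
        rw [E, dif_neg (by omega)] at hE
        omega
      have heq : s.getD j ' ' = s.getD (j + i) ' ' := by
        by_contra hc
        rw [E, dif_pos hlt, if_neg hc] at hE
        omega
      rw [E, dif_pos hlt, if_pos heq] at hE
      have hm : m ≤ E s i (j + 1) := by omega
      have := (ih (j + 1) (by omega)).mp hm
      refine ⟨by omega, ?_⟩
      intro t ht
      cases t with
      | zero => simpa using heq
      | succ t =>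
        have := this.2 t (by omega)
        convert this using 2 <;> omega
    · rintro ⟨hlen, hall⟩
      have hlt : j + i < s.length := by omega
      have heq : s.getD j ' ' = s.getD (j + i) ' ' := by simpa using hall 0 (by omega)
      rw [E, dif_pos hlt, if_pos heq]
      have : m ≤ E s i (j + 1) := by
        apply (ih (j + 1) (by omega)).mpr
        refine ⟨by omega, ?_⟩
        intro t ht
        have := hall (t + 1) (by omega)
        convert this using 2 <;> omega
      omega

theorem cond_iff_matchB (s : List Char) (i j : Nat) (_hi : 1 ≤ i) (hj : j + i ≤ s.length) :
    (j + 2 * i ≤ s.length ∧ i ≤ E s i j) ↔ matchB s i j = true := by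
  simp only [matchB, Bool.and_eq_true, decide_eq_true_eq]
  constructor
  · rintro ⟨h2, hE⟩
    refine ⟨h2, ?_⟩
    rw [slices_eq_iff s i j h2]
    exact ((E_ge_iff s i i j hj).mp hE).2
  · rintro ⟨h2, hs⟩
    refine ⟨h2, ?_⟩
    apply (E_ge_iff s i i j hj).mpr
    exact ⟨by omega, (slices_eq_iff s i j h2).mp hs⟩

theorem altGoJ_eq (s : List Char) (i : Nat) (hi : 1 ≤ i) :
    ∀ jp, jp ≤ s.length - i →
      altGoJ s s.length i jp (E s i jp) = (innerSpec s i jp).map (fun j => ins s i j) := by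
  intro jp
  induction jp with
  | zero => intro _; rfl
  | succ j ih =>
    intro hjp
    have hji : j + i < s.length := by omega
    have hext : (if s.getD j ' ' = s.getD (j + i) ' ' then E s i (j + 1) + 1 else 0) = E s i j := by
      conv_rhs => rw [E]
      rw [dif_pos hji]
    simp only [altGoJ]
    rw [hext]
    by_cases hc : j + 2 * i ≤ s.length ∧ i ≤ E s i j
    · rw [if_pos hc]
      have hm : matchB s i j = true := (cond_iff_matchB s i j hi (by omega)).mp hc
      simp only [innerSpec, hm, if_true, Option.map_some]
      rfl
    · rw [if_neg hc]
      have hm : ¬ matchB s i j = true := fun h => hc ((cond_iff_matchB s i j hi (by omega)).mpr h)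
      simp only [innerSpec, hm, if_false, Bool.false_eq_true]
      exact ih (by omega)

theorem innerSpec_trunc (s : List Char) (i : Nat) (hi : 1 ≤ i) :
    innerSpec s i s.length = innerSpec s i (s.length - i) := by
  have key : ∀ d, innerSpec s i (s.length - i + d) = innerSpec s i (s.length - i) := by
    intro d
    induction d with
    | zero => rfl
    | succ d ih =>
      have hm : matchB s i (s.length - i + d) = false := by
        simp only [matchB, Bool.and_eq_false_iff, decide_eq_false_iff_not]
        left; omega
      calc innerSpec s i (s.length - i + (d + 1))
          = innerSpec s i (s.length - i + d) := by
            show innerSpec s i ((s.length - i + d) + 1) = _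
            simp [innerSpec, hm]
        _ = innerSpec s i (s.length - i) := ih
  have := key (s.length - (s.length - i))
  rwa [show s.length - i + (s.length - (s.length - i)) = s.length by omega] at this

theorem altGoI_eq (s : List Char) : ∀ L, altGoI s s.length L = searchI s L := by
  intro L
  induction L using Nat.strong_induction_on with
  | _ L ih =>
    match L with
    | 0 => rfl
    | 1 => rfl
    | 2 => rfl
    | i + 3 =>
      have hE0 : E s (i + 3) (s.length - (i + 3)) = 0 := by rw [E, dif_neg (by omega)]
      have h1 := altGoJ_eq s (i + 3) (by omega) (s.length - (i + 3)) (le_refl _)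
      rw [hE0, ← innerSpec_trunc s (i + 3) (by omega)] at h1
      simp only [altGoI, searchI, h1]
      cases innerSpec s (i + 3) s.length with
      | some j => simp
      | none => simpa using ih (i + 2) (by omega)

theorem innerSpec_eq_getLast (s : List Char) (i : Nat) :
    ∀ jp, ((List.range jp).filter (fun j => matchB s i j)).getLast? = innerSpec s i jp := by
  intro jp
  induction jp with
  | zero => rfl
  | succ jp ih =>
    rw [List.range_succ, List.filter_append]
    cases hm : matchB s i jp with
    | true => simp [innerSpec, hm]
    | false => simp [innerSpec, hm, ih]

theorem pairsLast (s : List Char) :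
    ∀ L, ((((List.range' 3 (L + 1 - 3)).flatMap (fun i => (List.range s.length).map (fun j => (i, j)))).filter
        (fun p => matchB s p.1 p.2)).getLast?).elim s (fun p => ins s p.1 p.2)
      = (searchI s L).getD s := by
  intro L
  induction L using Nat.strong_induction_on with
  | _ L ih =>
    match L with
    | 0 => rfl
    | 1 => rfl
    | 2 => rfl
    | m + 3 =>
      have hcat : List.range' 3 (m + 3 + 1 - 3) = List.range' 3 m ++ [m + 3] := by
        rw [show m + 3 + 1 - 3 = m + 1 by omega, List.range'_concat]
        norm_num [Nat.add_comm 3 m]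
      rw [hcat, List.flatMap_append, List.filter_append, List.getLast?_append]
      simp only [List.flatMap_cons, List.flatMap_nil, List.append_nil]
      rw [show ((List.range s.length).map (fun j => ((m + 3 : Nat), j))).filter (fun p => matchB s p.1 p.2)
            = ((List.range s.length).filter (fun j => matchB s (m + 3) j)).map (fun j => ((m + 3 : Nat), j)) by
          rw [List.filter_map]
          rfl]
      rw [List.getLast?_map, innerSpec_eq_getLast]
      cases hj : innerSpec s (m + 3) s.length with
      | some j => simp [searchI, hj, ins]
      | none =>
        have hpre := ih (m + 2) (by omega)
        rw [show m + 2 + 1 - 3 = m by omega] at hpre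
        simpa [searchI, hj] using hpre

theorem stepEq (s : List Char) (i j : Nat) (hi : 3 ≤ i) (hj : j < s.length) (acc : List Char) :
    (let one := PySem.List.slice s (some (j : Int)) (some ((j : Int) + (i : Int)))
     let two := PySem.List.slice s (some ((j : Int) + (i : Int))) (some ((j : Int) + 2 * (i : Int)))
     if one = two then
       PySem.List.slice s none (some ((j : Int) + 2 * (i : Int))) ++ one ++
         PySem.List.slice s (some ((j : Int) + 2 * (i : Int))) none
     else acc)
    = (if matchB s i j then ins s i j else acc) := by
  have c1 : (j : Int) + (i : Int) = ((j + i : Nat) : Int) := by push_cast; ring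
  have c2 : (j : Int) + 2 * (i : Int) = ((j + 2 * i : Nat) : Int) := by push_cast; ring
  have e1 : PySem.List.slice s (some (j : Int)) (some ((j : Int) + (i : Int))) = (s.drop j).take i := by
    rw [c1, PySem.List.slice_natCast]
    congr 1
    omega
  have e2 : PySem.List.slice s (some ((j : Int) + (i : Int))) (some ((j : Int) + 2 * (i : Int)))
      = (s.drop (j + i)).take i := by
    rw [c1, c2, PySem.List.slice_natCast]
    congr 1
    omega
  have e3 : PySem.List.slice s none (some ((j : Int) + 2 * (i : Int))) = s.take (j + 2 * i) := by
    rw [c2, PySem.List.slice_to_natCast]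
  have e4 : PySem.List.slice s (some ((j : Int) + 2 * (i : Int))) none = s.drop (j + 2 * i) := by
    rw [c2, PySem.List.slice_from_natCast]
  simp only [e1, e2, e3, e4]
  by_cases he : (s.drop j).take i = (s.drop (j + i)).take i
  · have hm : matchB s i j = true := by
      simp only [matchB, Bool.and_eq_true, decide_eq_true_eq]
      exact ⟨dropTake_eq_imp s i j (by omega) hj he, he⟩
    simp [he, hm, ins]
  · have hm : matchB s i j = false := by
      simp only [matchB, Bool.and_eq_false_iff, decide_eq_false_iff_not]
      right; exact he
    simp [he, hm]

theorem A_char_list (s : List Char) :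
    String.ofList ((List.range' 3 (s.length / 2 + 1 - 3)).foldl (fun (seq5 : List Char) (i : Nat) =>
      (List.range s.length).foldl (fun (seq5 : List Char) (j : Nat) =>
        let one := PySem.List.slice s (some (j : Int)) (some ((j : Int) + (i : Int)))
        let two := PySem.List.slice s (some ((j : Int) + (i : Int))) (some ((j : Int) + 2 * (i : Int)))
        if one = two then
          PySem.List.slice s none (some ((j : Int) + 2 * (i : Int))) ++ one ++
            PySem.List.slice s (some ((j : Int) + 2 * (i : Int))) none
        else seq5) seq5) s)
    = ((searchI s (s.length / 2)).map String.ofList).getD (String.ofList s) := by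
  have hstep : ∀ (st : List Char) (i : Nat), i ∈ List.range' 3 (s.length / 2 + 1 - 3) →
      (List.range s.length).foldl (fun (seq5 : List Char) (j : Nat) =>
        let one := PySem.List.slice s (some (j : Int)) (some ((j : Int) + (i : Int)))
        let two := PySem.List.slice s (some ((j : Int) + (i : Int))) (some ((j : Int) + 2 * (i : Int)))
        if one = two then
          PySem.List.slice s none (some ((j : Int) + 2 * (i : Int))) ++ one ++
            PySem.List.slice s (some ((j : Int) + 2 * (i : Int))) none
        else seq5) st
      = (List.range s.length).foldl (fun st j => if matchB s i j then ins s i j else st) st := by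
    intro st i hi
    apply PySem.List.foldl_congr_mem
    intro acc j hj
    exact stepEq s i j (List.mem_range'_1.mp hi).1 (List.mem_range.mp hj) acc
  have houter := PySem.List.foldl_congr_mem (List.range' 3 (s.length / 2 + 1 - 3)) _
    (fun (st : List Char) (i : Nat) =>
      (List.range s.length).foldl (fun st j => if matchB s i j then ins s i j else st) st) s hstep
  rw [houter, foldl_nested, PySem.List.foldl_if_eq_foldl_filter,
    foldl_const_last, pairsLast]
  cases searchI s (s.length / 2) <;> simp

theorem A_char (seq1 : String) :
    add_variable_copy seq1 = ((searchI seq1.toList (seq1.toList.length / 2)).map String.ofList).getD (String.ofList seq1.toList) := by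
  exact A_char_list seq1.toList

theorem B_char (seq1 : String) :
    add_variable_copy_alt seq1 = ((searchI seq1.toList (seq1.toList.length / 2)).map String.ofList).getD (String.ofList seq1.toList) := by
  change (match altGoI seq1.toList seq1.toList.length (seq1.toList.length / 2) with
    | some r => String.ofList r
    | none => seq1) = _
  rw [altGoI_eq]
  cases searchI seq1.toList (seq1.toList.length / 2) <;> simp

-- ===== VERDICT (by name: the statement is the Claim_ definition above) =====
theorem add_variable_copy_spec : Claim_equal_add_variable_copy := by
  intro seq1 _
  unfold Spec_add_variable_copy
  rw [A_char, B_char]
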